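-- pv_equiv track=rewrite | github.com/ludimus/AOC2024 | day04/solution_part1_regex.py | extract_all_lines
-- ===== SOURCE A (Python) =====
-- def extract_all_lines(grid):
--     """Extract all possible lines from the grid in all 8 directions."""
--     if not grid or not grid[0]:
--         return []
--
--     rows, cols = len(grid), len(grid[0])
--     lines = []
--
--     # Horizontal lines (left-to-right)
--     for row in range(rows):
--         lines.append(''.join(grid[row]))
--
--     # Vertical lines (top-to-bottom)
--     for col in range(cols):
--         lines.append(''.join(grid[row][col] for row in range(rows)))
--
--     # Diagonal lines (top-left to bottom-right)
--     # Starting from top row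
--     for start_col in range(cols):
--         diagonal = []
--         row, col = 0, start_col
--         while row < rows and col < cols:
--             diagonal.append(grid[row][col])
--             row += 1
--             col += 1
--         if len(diagonal) >= 4:  # Only include if long enough for XMAS
--             lines.append(''.join(diagonal))
--
--     # Starting from left column (excluding top-left corner to avoid duplication)
--     for start_row in range(1, rows):
--         diagonal = []
--         row, col = start_row, 0
--         while row < rows and col < cols:
--             diagonal.append(grid[row][col])
--             row += 1
--             col += 1
--         if len(diagonal) >= 4:
--             lines.append(''.join(diagonal))
--
--     # Diagonal lines (top-right to bottom-left)
--     # Starting from top row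
--     for start_col in range(cols):
--         diagonal = []
--         row, col = 0, start_col
--         while row < rows and col >= 0:
--             diagonal.append(grid[row][col])
--             row += 1
--             col -= 1
--         if len(diagonal) >= 4:
--             lines.append(''.join(diagonal))
--
--     # Starting from right column (excluding top-right corner to avoid duplication)
--     for start_row in range(1, rows):
--         diagonal = []
--         row, col = start_row, cols - 1
--         while row < rows and col >= 0:
--             diagonal.append(grid[row][col])
--             row += 1
--             col -= 1
--         if len(diagonal) >= 4:
--             lines.append(''.join(diagonal))
--
--     return lines
-- ===== SOURCE B (Python) =====
-- def extract_all_lines(grid):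
--     """Extract all possible lines from the grid in all 8 directions."""
--     if not grid or not grid[0]:
--         return []
--     rows, cols = len(grid), len(grid[0])
--     # single row-major pass bucketing both diagonal families
--     d1, d2 = {}, {}  # keys: r - c (down-right), r + c (down-left)
--     for r in range(rows):
--         for c in range(cols):
--             ch = grid[r][c]
--             d1.setdefault(r - c, []).append(ch)
--             d2.setdefault(r + c, []).append(ch)
--     lines = list(grid)
--     for c in range(cols):
--         lines.append(''.join(grid[r][c] for r in range(rows)))
--     for k in [-c for c in range(cols)] + list(range(1, rows)):
--         b = d1[k]
--         if len(b) >= 4: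
--             lines.append(''.join(b))
--     for s in range(rows + cols - 1):
--         b = d2[s]
--         if len(b) >= 4:
--             lines.append(''.join(b))
--     return lines
-- ===== Notes on version B (the rewrite author's own statement) =====
-- stated objective: alternative
-- what changed: Diagonals are collected in one row-major bucketing pass over all cells (dicts keyed by r-c and r+c) and emitted in key order, instead of walking each diagonal with its own while-loop; horizontals are the row strings themselves.
import Mathlib
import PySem

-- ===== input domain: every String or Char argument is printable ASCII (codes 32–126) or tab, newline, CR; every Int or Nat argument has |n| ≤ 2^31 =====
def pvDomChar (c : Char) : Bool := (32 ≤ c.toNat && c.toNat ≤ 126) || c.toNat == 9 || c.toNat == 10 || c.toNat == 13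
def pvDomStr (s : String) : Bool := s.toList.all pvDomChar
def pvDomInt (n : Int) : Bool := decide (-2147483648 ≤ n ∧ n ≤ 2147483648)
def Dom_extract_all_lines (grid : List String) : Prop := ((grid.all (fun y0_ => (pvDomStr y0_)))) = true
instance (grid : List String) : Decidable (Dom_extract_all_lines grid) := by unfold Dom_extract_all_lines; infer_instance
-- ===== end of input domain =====

-- B collects both diagonal families in ONE row-major bucketing pass (dicts keyed by r-c / r+c)
-- and emits the buckets in key order, instead of A's per-diagonal while-loop walks; same output list.

-- shared cell accessors (grid[r], grid[r][c]; indices produced by the loops are always ≥ 0,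
-- in-range inside Pre_, so the default is never observed there)
def pvRow (grid : List String) (r : Nat) : List Char := (grid.getD r "").toList
def pvCharD (grid : List String) (r c : Nat) : Char := (pvRow grid r).getD c ' '

-- `if len(diagonal) >= 4: lines.append(''.join(diagonal))` — used verbatim by both Pythons
def pvEmit (d : List Char) : Option String := if 4 ≤ d.length then some (String.ofList d) else none

-- vertical lines: code identical in both Pythons
def pvVer (grid : List String) (rows cols : Nat) : List String :=
  (List.range cols).map (fun c => String.ofList ((List.range rows).map (fun r => pvCharD grid r c)))

-- ===== PORT A =====
-- `while row < rows and col < cols: diagonal.append(grid[row][col]); row += 1; col += 1`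
def pvWalkDR (grid : List String) (rows cols : Nat) (r c : Nat) : List Char :=
  if r < rows ∧ c < cols then pvCharD grid r c :: pvWalkDR grid rows cols (r + 1) (c + 1)
  else []
termination_by rows - r

-- `while row < rows and col >= 0: diagonal.append(grid[row][col]); row += 1; col -= 1`
def pvWalkDL (grid : List String) (rows : Nat) (r : Nat) (c : Int) : List Char :=
  if r < rows ∧ 0 ≤ c then pvCharD grid r c.toNat :: pvWalkDL grid rows (r + 1) (c - 1)
  else []
termination_by rows - r

def extract_all_lines (grid : List String) : List String :=
  match grid with
  | [] => []
  | g0 :: _ =>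
    if g0.toList.length = 0 then []
    else
      let rows := grid.length
      let cols := g0.toList.length
      (List.range rows).map (fun r => String.ofList (pvRow grid r)) ++
      pvVer grid rows cols ++
      (List.range cols).filterMap (fun sc => pvEmit (pvWalkDR grid rows cols 0 sc)) ++
      (List.range' 1 (rows - 1)).filterMap (fun sr => pvEmit (pvWalkDR grid rows cols sr 0)) ++
      (List.range cols).filterMap (fun (sc : Nat) => pvEmit (pvWalkDL grid rows 0 (sc : Int))) ++
      (List.range' 1 (rows - 1)).filterMap (fun sr => pvEmit (pvWalkDL grid rows sr ((cols : Int) - 1)))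

-- ===== PORT B =====
-- the nested `for r in range(rows): for c in range(cols):` cell order
def pvCells (rows cols : Nat) : List (Nat × Nat) :=
  (List.range rows).flatMap (fun r => (List.range cols).map (fun c => (r, c)))

-- loop body: d1.setdefault(r-c, []).append(ch); d2.setdefault(r+c, []).append(ch)
def pvStep (grid : List String)
    (p : PySem.Dict Int (List Char) × PySem.Dict Int (List Char)) (rc : Nat × Nat) :
    PySem.Dict Int (List Char) × PySem.Dict Int (List Char) :=
  (p.1.modify ((rc.1 : Int) - (rc.2 : Int)) [] (fun l => l ++ [pvCharD grid rc.1 rc.2]),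
   p.2.modify ((rc.1 : Int) + (rc.2 : Int)) [] (fun l => l ++ [pvCharD grid rc.1 rc.2]))

def pvBuckets (grid : List String) (rows cols : Nat) :
    PySem.Dict Int (List Char) × PySem.Dict Int (List Char) :=
  (pvCells rows cols).foldl (pvStep grid) (PySem.Dict.empty, PySem.Dict.empty)

def extract_all_lines_alt (grid : List String) : List String :=
  match grid with
  | [] => []
  | g0 :: _ =>
    if g0.toList.length = 0 then []
    else
      let rows := grid.length
      let cols := g0.toList.length
      let bk := pvBuckets grid rows cols
      grid ++
      pvVer grid rows cols ++
      ((List.range cols).map (fun (c : Nat) => -(c : Int)) ++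
        (List.range' 1 (rows - 1)).map (fun (sr : Nat) => ((sr : Nat) : Int))).filterMap
        (fun k => pvEmit (bk.1.getD k [])) ++
      (List.range (rows + cols - 1)).filterMap (fun (s : Nat) => pvEmit (bk.2.getD ((s : Nat) : Int) []))

-- ===== PRECONDITION & SPEC =====
-- Pre_ excludes exactly the ragged grids on which Python A raises IndexError:
-- some row shorter than grid[0] (with grid[0] nonempty); rows longer than grid[0] are kept.
def Pre_extract_all_lines (grid : List String) : Prop :=
  ∀ s ∈ grid, (grid.headD "").toList.length ≤ s.toList.length
instance (grid : List String) : Decidable (Pre_extract_all_lines grid) := by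
  unfold Pre_extract_all_lines; infer_instance

def pvWitness_extract_all_lines : List String := ["XMAS", "MMMM", "AAAA", "SSSS"]

def Spec_extract_all_lines (grid : List String) (out : List String) : Prop :=
  out = extract_all_lines_alt grid
instance (grid : List String) (out : List String) : Decidable (Spec_extract_all_lines grid out) := by
  unfold Spec_extract_all_lines; infer_instance

-- ===== CLAIM (what is proved, stated in full; the proofs are below) =====
def Claim_equal_extract_all_lines : Prop :=
  ∀ (grid : List String), Dom_extract_all_lines grid → Pre_extract_all_lines grid →
    Spec_extract_all_lines grid (extract_all_lines grid)

-- ===== LEMMAS AND PROOFS =====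

-- a fold whose two state components evolve independently splits into two folds
theorem pv_foldl_pair_split {α β γ : Type} (l : List γ) (f : α → γ → α) (g : β → γ → β)
    (a : α) (b : β) :
    l.foldl (fun p x => (f p.1 x, g p.2 x)) (a, b) = (l.foldl f a, l.foldl g b) := by
  induction l generalizing a b with
  | nil => rfl
  | cons x xs ih => simp [List.foldl_cons, ih]

-- bucket contents: getD after the grouping fold = values of the matching cells, in cell order
theorem pv_bucket_getD {κ : Type} [BEq κ] [LawfulBEq κ] {γ : Type} (l : List γ)
    (key : γ → κ) (val : γ → Char) (k : κ) :
    ((l.foldl (fun d x => d.modify (key x) [] (fun s => s ++ [val x])) PySem.Dict.empty).getD k [])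
      = (l.filter (fun x => key x == k)).map val := by
  have h := PySem.Dict.getD_foldl_modify_append
      (l := l.map (fun x => (key x, val x))) (d := (PySem.Dict.empty : PySem.Dict κ (List Char)))
      (c := k)
  simpa [List.foldl_map, List.filter_map, Function.comp, List.map_map] using h

-- the cells of one row-major pass holding a predicate
theorem pv_cells_filter (rows cols : Nat) (p : Nat × Nat → Bool) :
    (pvCells rows cols).filter p =
      (List.range rows).flatMap
        (fun r => ((List.range cols).filter (fun c => p (r, c))).map (fun c => (r, c))) := by
  simp only [pvCells, List.filter_flatMap, List.filter_map]
  rfl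

-- filtering range n for the single Int value v
theorem pv_range_filter_int (n : Nat) (v : Int) :
    (List.range n).filter (fun c => ((c : Nat) : Int) == v) =
      if 0 ≤ v ∧ v < n then [v.toNat] else [] := by
  induction n with
  | zero =>
    have h : ¬ (0 ≤ v ∧ v < ((0 : Nat) : Int)) := by push_cast; omega
    simp [h]
  | succ m ih =>
    rw [List.range_succ, List.filter_append, ih]
    by_cases h : ((m : Nat) : Int) = v
    · have h1 : ¬ (0 ≤ v ∧ v < ((m : Nat) : Int)) := by omega
      have h2 : 0 ≤ v ∧ v < (((m + 1 : Nat)) : Int) := by push_cast; omega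
      have h3 : v.toNat = m := by omega
      simp [h1, h2, h, h3]
    · have hb : (((m : Nat) : Int) == v) = false := by simpa using h
      simp only [List.filter_cons, hb, List.filter_nil, List.append_nil, if_false,
        Bool.false_eq_true]
      exact if_congr (by push_cast; omega) rfl rfl

-- the rows of range n selected by an interval [a, b)
theorem pv_flatMap_interval (n a b : Nat) (f : Nat → Char) :
    (List.range n).flatMap (fun r => if a ≤ r ∧ r < b then [f r] else []) =
      (List.range (min (n - a) (b - a))).map (fun i => f (a + i)) := by
  induction n with
  | zero => simp
  | succ m ih =>
    rw [List.range_succ, List.flatMap_append, ih]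
    by_cases h : a ≤ m ∧ m < b
    · have h1 : min (m + 1 - a) (b - a) = min (m - a) (b - a) + 1 := by omega
      rw [h1, List.range_succ, List.map_append]
      have h2 : a + min (m - a) (b - a) = m := by omega
      simp [h, h2]
    · have h1 : min (m + 1 - a) (b - a) = min (m - a) (b - a) := by omega
      simp [h, h1]

-- A's down-right walk in closed form
theorem pv_walkDR_eq (grid : List String) (rows cols : Nat) :
    ∀ (r c : Nat), pvWalkDR grid rows cols r c =
      (List.range (min (rows - r) (cols - c))).map (fun i => pvCharD grid (r + i) (c + i)) := by
  intro r c
  induction r, c using pvWalkDR.induct rows cols with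
  | case1 r c h ih =>
    rw [pvWalkDR, if_pos h, ih]
    have h1 : min (rows - r) (cols - c) = min (rows - (r+1)) (cols - (c+1)) + 1 := by omega
    rw [h1, List.range_succ_eq_map]
    simp [List.map_map, Function.comp, h]
    intro a _ _
    have e1 : r + 1 + a = r + (a + 1) := by omega
    have e2 : c + 1 + a = c + (a + 1) := by omega
    rw [e1, e2]
  | case2 r c h =>
    rw [pvWalkDR, if_neg h]
    have : min (rows - r) (cols - c) = 0 := by omega
    simp [this]

-- A's down-left walk in closed form
theorem pv_walkDL_eq (grid : List String) (rows : Nat) :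
    ∀ (r : Nat) (c : Int), pvWalkDL grid rows r c =
      (List.range (min (rows - r) (c + 1).toNat)).map (fun i => pvCharD grid (r + i) (c - i).toNat) := by
  intro r c
  induction r, c using pvWalkDL.induct rows with
  | case1 r c h ih =>
    rw [pvWalkDL, if_pos h, ih]
    have h1 : min (rows - r) (c + 1).toNat = min (rows - (r+1)) ((c - 1) + 1).toNat + 1 := by omega
    rw [h1, List.range_succ_eq_map]
    simp [List.map_map, Function.comp, h]
    intro a _ _
    have e1 : r + 1 + a = r + (a + 1) := by omega
    have e2 : c.toNat - 1 - a = c.toNat - (a + 1) := by omega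
    rw [e1, e2]
  | case2 r c h =>
    rw [pvWalkDL, if_neg h]
    have : min (rows - r) (c + 1).toNat = 0 := by omega
    simp [this]

-- the paired fold splits into the two independent dict folds
theorem pv_buckets_split (grid : List String) (rows cols : Nat) :
    pvBuckets grid rows cols =
      ((pvCells rows cols).foldl
        (fun d rc => d.modify ((rc.1 : Int) - (rc.2 : Int)) [] (fun l => l ++ [pvCharD grid rc.1 rc.2]))
        PySem.Dict.empty,
       (pvCells rows cols).foldl
        (fun d rc => d.modify ((rc.1 : Int) + (rc.2 : Int)) [] (fun l => l ++ [pvCharD grid rc.1 rc.2]))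
        PySem.Dict.empty) := by
  unfold pvBuckets pvStep
  exact pv_foldl_pair_split (pvCells rows cols)
    (fun d rc => d.modify ((rc.1 : Int) - (rc.2 : Int)) [] (fun l => l ++ [pvCharD grid rc.1 rc.2]))
    (fun d rc => d.modify ((rc.1 : Int) + (rc.2 : Int)) [] (fun l => l ++ [pvCharD grid rc.1 rc.2]))
    PySem.Dict.empty PySem.Dict.empty

-- bucket 1 (key r - c) in closed form
theorem pv_bucket1_eq (grid : List String) (rows cols : Nat) (k : Int) :
    (pvBuckets grid rows cols).1.getD k [] =
      (List.range rows).flatMap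
        (fun (r : Nat) => if 0 ≤ (r : Int) - k ∧ (r : Int) - k < cols
                  then [pvCharD grid r ((r : Int) - k).toNat] else []) := by
  rw [pv_buckets_split]
  rw [pv_bucket_getD (pvCells rows cols) (fun rc => (rc.1 : Int) - (rc.2 : Int))
      (fun rc => pvCharD grid rc.1 rc.2) k]
  rw [pv_cells_filter, List.map_flatMap]
  congr 1
  funext r
  rw [List.map_map]
  have hp : (fun c : Nat => ((r : Int) - (c : Int) == k)) = (fun c : Nat => (((c : Nat) : Int) == (r : Int) - k)) := by
    funext c
    rw [Bool.eq_iff_iff]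
    simp only [beq_iff_eq]
    omega
  simp only [hp, pv_range_filter_int]
  split_ifs <;> simp [Function.comp]

-- bucket 2 (key r + c) in closed form
theorem pv_bucket2_eq (grid : List String) (rows cols : Nat) (k : Int) :
    (pvBuckets grid rows cols).2.getD k [] =
      (List.range rows).flatMap
        (fun (r : Nat) => if 0 ≤ k - (r : Int) ∧ k - (r : Int) < cols
                  then [pvCharD grid r (k - (r : Int)).toNat] else []) := by
  rw [pv_buckets_split]
  rw [pv_bucket_getD (pvCells rows cols) (fun rc => (rc.1 : Int) + (rc.2 : Int))
      (fun rc => pvCharD grid rc.1 rc.2) k]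
  rw [pv_cells_filter, List.map_flatMap]
  congr 1
  funext r
  rw [List.map_map]
  have hp : (fun c : Nat => ((r : Int) + (c : Int) == k)) = (fun c : Nat => (((c : Nat) : Int) == k - (r : Int))) := by
    funext c
    rw [Bool.eq_iff_iff]
    simp only [beq_iff_eq]
    omega
  simp only [hp, pv_range_filter_int]
  split_ifs <;> simp [Function.comp]

-- family equalities: each emitted bucket is the corresponding walk
theorem pv_dr1 (grid : List String) (rows cols : Nat) (sc : Nat) :
    (pvBuckets grid rows cols).1.getD (-(sc : Int)) [] = pvWalkDR grid rows cols 0 sc := by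
  rw [pv_bucket1_eq, pv_walkDR_eq]
  have hc : ∀ r : Nat,
      (if 0 ≤ (r : Int) - -(sc : Int) ∧ (r : Int) - -(sc : Int) < cols
       then [pvCharD grid r ((r : Int) - -(sc : Int)).toNat] else []) =
      (if 0 ≤ r ∧ r < cols - sc then [pvCharD grid r (sc + r)] else []) := by
    intro r
    have e : ((r : Int) - -(sc : Int)).toNat = sc + r := by omega
    rw [e]
    exact if_congr (by omega) rfl rfl
  simp only [hc]
  rw [pv_flatMap_interval rows 0 (cols - sc) (fun r => pvCharD grid r (sc + r))]
  simp

theorem pv_dr2 (grid : List String) (rows cols : Nat) (sr : Nat) :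
    (pvBuckets grid rows cols).1.getD ((sr : Int)) [] = pvWalkDR grid rows cols sr 0 := by
  rw [pv_bucket1_eq, pv_walkDR_eq]
  have hc : ∀ r : Nat,
      (if 0 ≤ (r : Int) - (sr : Int) ∧ (r : Int) - (sr : Int) < cols
       then [pvCharD grid r ((r : Int) - (sr : Int)).toNat] else []) =
      (if sr ≤ r ∧ r < sr + cols then [pvCharD grid r (r - sr)] else []) := by
    intro r
    have e : ((r : Int) - (sr : Int)).toNat = r - sr := by omega
    rw [e]
    exact if_congr (by omega) rfl rfl
  simp only [hc]
  rw [pv_flatMap_interval rows sr (sr + cols) (fun r => pvCharD grid r (r - sr))]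
  have hm : min (rows - sr) (sr + cols - sr) = min (rows - sr) (cols - 0) := by omega
  rw [hm]
  apply List.map_congr_left
  intro i _
  have e : sr + i - sr = 0 + i := by omega
  rw [e]

theorem pv_dl1 (grid : List String) (rows cols : Nat) (sc : Nat) (hsc : sc < cols) :
    (pvBuckets grid rows cols).2.getD ((sc : Int)) [] = pvWalkDL grid rows 0 (sc : Int) := by
  rw [pv_bucket2_eq, pv_walkDL_eq]
  have hc : ∀ r : Nat,
      (if 0 ≤ (sc : Int) - (r : Int) ∧ (sc : Int) - (r : Int) < cols
       then [pvCharD grid r ((sc : Int) - (r : Int)).toNat] else []) =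
      (if 0 ≤ r ∧ r < sc + 1 then [pvCharD grid r (sc - r)] else []) := by
    intro r
    have e : ((sc : Int) - (r : Int)).toNat = sc - r := by omega
    rw [e]
    exact if_congr (by omega) rfl rfl
  simp only [hc]
  rw [pv_flatMap_interval rows 0 (sc + 1) (fun r => pvCharD grid r (sc - r))]
  have hm : min (rows - 0) (sc + 1 - 0) = min (rows - 0) ((sc : Int) + 1).toNat := by omega
  rw [hm]
  apply List.map_congr_left
  intro i _
  have e : sc - (0 + i) = ((sc : Int) - (i : Int)).toNat := by omega
  rw [e]

theorem pv_dl2 (grid : List String) (rows cols : Nat) (sr : Nat) (hc0 : 0 < cols) :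
    (pvBuckets grid rows cols).2.getD ((sr : Int) + (cols : Int) - 1) [] =
      pvWalkDL grid rows sr ((cols : Int) - 1) := by
  rw [pv_bucket2_eq, pv_walkDL_eq]
  have hc : ∀ r : Nat,
      (if 0 ≤ ((sr : Int) + (cols : Int) - 1) - (r : Int) ∧ ((sr : Int) + (cols : Int) - 1) - (r : Int) < cols
       then [pvCharD grid r (((sr : Int) + (cols : Int) - 1) - (r : Int)).toNat] else []) =
      (if sr ≤ r ∧ r < sr + cols then [pvCharD grid r (sr + cols - 1 - r)] else []) := by
    intro r
    have e : (((sr : Int) + (cols : Int) - 1) - (r : Int)).toNat = sr + cols - 1 - r := by omega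
    rw [e]
    exact if_congr (by omega) rfl rfl
  simp only [hc]
  rw [pv_flatMap_interval rows sr (sr + cols) (fun r => pvCharD grid r (sr + cols - 1 - r))]
  have hm : min (rows - sr) (sr + cols - sr) = min (rows - sr) (((cols : Int) - 1) + 1).toNat := by omega
  rw [hm]
  apply List.map_congr_left
  intro i _
  have e : sr + cols - 1 - (sr + i) = (((cols : Int) - 1) - (i : Int)).toNat := by omega
  rw [e]

-- B's first key pass emits exactly A's two down-right families, in order
theorem pv_diag1_eq (grid : List String) (rows cols : Nat) :
    ((List.range cols).map (fun (c : Nat) => -(c : Int)) ++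
      (List.range' 1 (rows - 1)).map (fun (sr : Nat) => ((sr : Nat) : Int))).filterMap
      (fun k => pvEmit ((pvBuckets grid rows cols).1.getD k [])) =
    (List.range cols).filterMap (fun sc => pvEmit (pvWalkDR grid rows cols 0 sc)) ++
    (List.range' 1 (rows - 1)).filterMap (fun sr => pvEmit (pvWalkDR grid rows cols sr 0)) := by
  rw [List.filterMap_append]
  rw [List.filterMap_map, List.filterMap_map]
  congr 1
  · apply List.filterMap_congr
    intro sc _
    simp [Function.comp, pv_dr1]
  · apply List.filterMap_congr
    intro sr _
    simp [Function.comp, pv_dr2]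

-- B's second key pass emits exactly A's two down-left families, in order
theorem pv_diag2_eq (grid : List String) (rows cols : Nat) (hc : 0 < cols) (hr : 0 < rows) :
    (List.range (rows + cols - 1)).filterMap
      (fun s => pvEmit ((pvBuckets grid rows cols).2.getD ((s : Nat) : Int) [])) =
    (List.range cols).filterMap (fun (sc : Nat) => pvEmit (pvWalkDL grid rows 0 (sc : Int))) ++
    (List.range' 1 (rows - 1)).filterMap (fun sr => pvEmit (pvWalkDL grid rows sr ((cols : Int) - 1))) := by
  have h1 : rows + cols - 1 = cols + (rows - 1) := by omega
  rw [h1, List.range_add, List.filterMap_append, List.filterMap_map]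
  congr 1
  · apply List.filterMap_congr
    intro sc hsc
    rw [pv_dl1 grid rows cols sc (List.mem_range.mp hsc)]
  · rw [List.range'_eq_map_range, List.filterMap_map]
    apply List.filterMap_congr
    intro j _
    have e : ((cols + j : Nat) : Int) = ((1 + j : Nat) : Int) + (cols : Int) - 1 := by
      push_cast; omega
    simp only [Function.comp]
    rw [e, pv_dl2 grid rows cols (1 + j) hc]

-- horizontals: joining each row gives back the rows
theorem pv_hor (grid : List String) :
    (List.range grid.length).map (fun r => String.ofList (pvRow grid r)) = grid := by
  apply List.ext_getElem
  · simp
  · intro i h1 h2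
    have hi : i < grid.length := by simpa using h2
    simp [pvRow, List.getD_eq_getElem?_getD, List.getElem?_eq_getElem hi, String.ofList_toList]

-- the two ports agree on every input
theorem pv_main (grid : List String) : extract_all_lines grid = extract_all_lines_alt grid := by
  cases grid with
  | nil => rfl
  | cons g0 rest =>
    simp only [extract_all_lines, extract_all_lines_alt]
    by_cases h0 : g0.toList.length = 0
    · rw [if_pos h0, if_pos h0]
    · rw [if_neg h0, if_neg h0]
      rw [pv_diag1_eq, pv_diag2_eq (g0 :: rest) (g0 :: rest).length g0.toList.length (by omega) (by simp)]
      rw [pv_hor (g0 :: rest)]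
      simp [List.append_assoc]

-- ===== VERDICT (by name: the statement is the Claim_ definition above) =====
theorem extract_all_lines_spec : Claim_equal_extract_all_lines := by
  intro grid _ _
  unfold Spec_extract_all_lines
  exact pv_main grid
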